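-- pv_equiv track=rewrite | github.com/ckoons/BubbleSpacetimeTheory | play/toy_1181_convergence_875_test.py | is_7smooth
-- ===== SOURCE A (Python) =====
-- def is_7smooth(n):
--     if n == 0:
--         return False
--     n = abs(n)
--     if n == 1:
--         return True
--     for p in [2, 3, 5, 7]:
--         while n % p == 0:
--             n //= p
--     return n == 1
-- ===== SOURCE B (Python) =====
-- def _gcd(a, b):
--     while b:
--         a, b = b, a % b
--     return a
--
--
-- def is_7smooth(n):
--     n = abs(n)
--     if n == 0:
--         return False
--     g = _gcd(n, 210)
--     while g > 1:
--         n //= g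
--         g = _gcd(n, 210)
--     return n == 1
-- ===== Notes on version B (the rewrite author's own statement) =====
-- stated objective: alternative
-- what changed: Replaces the four per-prime stripping loops with a single gcd-reduction loop against 210 = 2*3*5*7: repeatedly divide n by gcd(n, 210) until the gcd is 1, then test n == 1.
import Mathlib
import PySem

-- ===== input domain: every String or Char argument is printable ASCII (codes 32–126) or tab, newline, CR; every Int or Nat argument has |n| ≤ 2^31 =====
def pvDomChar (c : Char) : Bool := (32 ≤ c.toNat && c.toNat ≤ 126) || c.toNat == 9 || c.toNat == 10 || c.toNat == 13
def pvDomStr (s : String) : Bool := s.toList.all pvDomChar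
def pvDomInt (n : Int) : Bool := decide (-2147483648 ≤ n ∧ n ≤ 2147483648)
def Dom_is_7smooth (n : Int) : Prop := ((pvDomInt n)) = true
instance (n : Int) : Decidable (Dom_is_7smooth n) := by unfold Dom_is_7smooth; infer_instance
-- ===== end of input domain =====

-- B replaces the four per-prime stripping loops of A with a single gcd(n,210)-reduction
-- loop (alternative algorithm, same cost class); return values agree everywhere.

-- ===== PORT A =====
-- the inner 'while n % p == 0: n //= p' loop; after abs, n ≥ 1, so Nat division is exact
def stripP (p : Nat) (n : Nat) : Nat :=
  if h : 2 ≤ p ∧ n ≠ 0 ∧ n % p = 0 then stripP p (n / p) else n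
termination_by n
decreasing_by exact Nat.div_lt_self (Nat.pos_of_ne_zero h.2.1) (by omega)

def is_7smooth (n : Int) : Bool :=
  if n = 0 then false
  else
    let m0 := n.natAbs                -- n = abs(n)
    if m0 = 1 then true
    else
      -- for p in [2, 3, 5, 7]: while n % p == 0: n //= p
      let m1 := stripP 2 m0
      let m2 := stripP 3 m1
      let m3 := stripP 5 m2
      let m4 := stripP 7 m3
      decide (m4 = 1)

-- ===== PORT B =====
-- Source B's hand-written Euclidean _gcd
def gcdE (a b : Nat) : Nat :=
  if h : b = 0 then a else gcdE b (a % b)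
termination_by b
decreasing_by exact Nat.mod_lt _ (Nat.pos_of_ne_zero h)

-- 'while g > 1: n //= g; g = _gcd(n, 210)'; the n ≠ 0 conjunct is a totality guard only
-- (B always runs this with n ≥ 1, where it is redundant)
def reduceB (n : Nat) : Nat :=
  if h : 1 < gcdE n 210 ∧ n ≠ 0 then reduceB (n / gcdE n 210) else n
termination_by n
decreasing_by exact Nat.div_lt_self (Nat.pos_of_ne_zero h.2) h.1

def is_7smooth_alt (n : Int) : Bool :=
  let m := n.natAbs                   -- n = abs(n)
  if m = 0 then false
  else decide (reduceB m = 1)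

-- ===== PRECONDITION & SPEC =====
def Spec_is_7smooth (n : Int) (out : Bool) : Prop := out = is_7smooth_alt n
instance (n : Int) (out : Bool) : Decidable (Spec_is_7smooth n out) := by unfold Spec_is_7smooth; infer_instance

-- ===== CLAIM (what is proved, stated in full; the proofs are below) =====
def Claim_equal_is_7smooth : Prop := ∀ (n : Int), Dom_is_7smooth n → Spec_is_7smooth n (is_7smooth n)

-- ===== LEMMAS AND PROOFS =====

-- n is 7-smooth iff every prime factor divides 210 = 2*3*5*7
def Smooth (n : Nat) : Prop := ∀ q : Nat, q.Prime → q ∣ n → q ∣ 210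

theorem gcdE_eq (a b : Nat) : gcdE a b = Nat.gcd b a := by
  induction b using Nat.strong_induction_on generalizing a with
  | _ b ih =>
    rw [gcdE]
    split
    · subst ‹b = 0›; simp
    · rw [ih (a % b) (Nat.mod_lt _ (Nat.pos_of_ne_zero ‹b ≠ 0›)) b]
      exact (Nat.gcd_rec b a).symm

theorem stripP_ne_zero (p n : Nat) (hn : n ≠ 0) : stripP p n ≠ 0 := by
  induction n using Nat.strong_induction_on with
  | _ n ih =>
    rw [stripP]
    split
    · rename_i h
      have hp : 0 < p := by omega
      have hd : p ∣ n := Nat.dvd_of_mod_eq_zero h.2.2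
      exact ih (n / p) (Nat.div_lt_self (Nat.pos_of_ne_zero h.2.1) (by omega))
        (Nat.ne_of_gt (Nat.div_pos (Nat.le_of_dvd (Nat.pos_of_ne_zero h.2.1) hd) hp))
    · exact hn

theorem stripP_dvd (p n : Nat) : stripP p n ∣ n := by
  induction n using Nat.strong_induction_on with
  | _ n ih =>
    rw [stripP]
    split
    · rename_i h
      exact Dvd.dvd.trans
        (ih (n / p) (Nat.div_lt_self (Nat.pos_of_ne_zero h.2.1) (by omega)))
        (Nat.div_dvd_of_dvd (Nat.dvd_of_mod_eq_zero h.2.2))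
    · exact dvd_refl n

theorem stripP_not_dvd (p n : Nat) (hp : 2 ≤ p) (hn : n ≠ 0) : ¬ p ∣ stripP p n := by
  induction n using Nat.strong_induction_on with
  | _ n ih =>
    rw [stripP]
    split
    · rename_i h
      have hd : p ∣ n := Nat.dvd_of_mod_eq_zero h.2.2
      exact ih (n / p) (Nat.div_lt_self (Nat.pos_of_ne_zero h.2.1) (by omega))
        (Nat.ne_of_gt (Nat.div_pos (Nat.le_of_dvd (Nat.pos_of_ne_zero h.2.1) hd) (by omega)))
    · rename_i h
      intro hdvd
      exact h ⟨hp, hn, Nat.mod_eq_zero_of_dvd hdvd⟩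

theorem stripP_dvd_iff (p n q : Nat) (hq : q.Prime) (hqp : ¬ q ∣ p) :
    q ∣ stripP p n ↔ q ∣ n := by
  induction n using Nat.strong_induction_on with
  | _ n ih =>
    rw [stripP]
    split
    · rename_i h
      have hd : p ∣ n := Nat.dvd_of_mod_eq_zero h.2.2
      rw [ih (n / p) (Nat.div_lt_self (Nat.pos_of_ne_zero h.2.1) (by omega))]
      constructor
      · intro hq'; exact hq'.trans (Nat.div_dvd_of_dvd hd)
      · intro hq'
        have : n = (n / p) * p := (Nat.div_mul_cancel hd).symm
        rcases (Nat.Prime.dvd_mul hq).mp (this ▸ hq') with h' | h'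
        · exact h'
        · exact absurd h' hqp
    · exact Iff.rfl

theorem prime_dvd_210 (q : Nat) (hq : q.Prime) (h : q ∣ 210) :
    q = 2 ∨ q = 3 ∨ q = 5 ∨ q = 7 := by
  have h210 : (210 : Nat) = 2 * (3 * (5 * 7)) := by norm_num
  rw [h210] at h
  rcases (Nat.Prime.dvd_mul hq).mp h with h | h
  · exact Or.inl ((Nat.prime_dvd_prime_iff_eq hq (by norm_num)).mp h)
  rcases (Nat.Prime.dvd_mul hq).mp h with h | h
  · exact Or.inr (Or.inl ((Nat.prime_dvd_prime_iff_eq hq (by norm_num)).mp h))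
  rcases (Nat.Prime.dvd_mul hq).mp h with h | h
  · exact Or.inr (Or.inr (Or.inl ((Nat.prime_dvd_prime_iff_eq hq (by norm_num)).mp h)))
  · exact Or.inr (Or.inr (Or.inr ((Nat.prime_dvd_prime_iff_eq hq (by norm_num)).mp h)))

theorem chain_eq_one_iff (n : Nat) (hn : n ≠ 0) :
    stripP 7 (stripP 5 (stripP 3 (stripP 2 n))) = 1 ↔ Smooth n := by
  set m1 := stripP 2 n with hm1
  set m2 := stripP 3 m1 with hm2
  set m3 := stripP 5 m2 with hm3
  set m4 := stripP 7 m3 with hm4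
  have h1 : m1 ≠ 0 := stripP_ne_zero _ _ hn
  have h2 : m2 ≠ 0 := stripP_ne_zero _ _ h1
  have h3 : m3 ≠ 0 := stripP_ne_zero _ _ h2
  have h4 : m4 ≠ 0 := stripP_ne_zero _ _ h3
  have hdvd : m4 ∣ n :=
    ((stripP_dvd 7 m3).trans ((stripP_dvd 5 m2).trans
      ((stripP_dvd 3 m1).trans (stripP_dvd 2 n))))
  constructor
  · intro hone q hq hqn
    by_contra hq210
    have hq2 : ¬ q ∣ 2 := fun h => hq210 (h.trans (by norm_num))
    have hq3 : ¬ q ∣ 3 := fun h => hq210 (h.trans (by norm_num))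
    have hq5 : ¬ q ∣ 5 := fun h => hq210 (h.trans (by norm_num))
    have hq7 : ¬ q ∣ 7 := fun h => hq210 (h.trans (by norm_num))
    have : q ∣ m4 := by
      rw [hm4, stripP_dvd_iff 7 m3 q hq hq7, hm3, stripP_dvd_iff 5 m2 q hq hq5,
        hm2, stripP_dvd_iff 3 m1 q hq hq3, hm1, stripP_dvd_iff 2 n q hq hq2]
      exact hqn
    rw [hone] at this
    exact Nat.Prime.one_lt hq |>.ne' (Nat.eq_one_of_dvd_one this)
  · intro hs
    by_contra hne
    obtain ⟨q, hq, hqm⟩ := Nat.exists_prime_and_dvd hne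
    have hq210 : q ∣ 210 := hs q hq (hqm.trans hdvd)
    have h7 : ¬ (7 : Nat) ∣ m4 := stripP_not_dvd 7 m3 (by norm_num) h3
    have h5 : ¬ (5 : Nat) ∣ m4 := by
      rw [hm4, stripP_dvd_iff 7 m3 5 (by norm_num) (by norm_num)]
      exact stripP_not_dvd 5 m2 (by norm_num) h2
    have h3' : ¬ (3 : Nat) ∣ m4 := by
      rw [hm4, stripP_dvd_iff 7 m3 3 (by norm_num) (by norm_num),
        hm3, stripP_dvd_iff 5 m2 3 (by norm_num) (by norm_num)]
      exact stripP_not_dvd 3 m1 (by norm_num) h1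
    have h2' : ¬ (2 : Nat) ∣ m4 := by
      rw [hm4, stripP_dvd_iff 7 m3 2 (by norm_num) (by norm_num),
        hm3, stripP_dvd_iff 5 m2 2 (by norm_num) (by norm_num),
        hm2, stripP_dvd_iff 3 m1 2 (by norm_num) (by norm_num)]
      exact stripP_not_dvd 2 n (by norm_num) hn
    rcases prime_dvd_210 q hq hq210 with rfl | rfl | rfl | rfl
    · exact h2' hqm
    · exact h3' hqm
    · exact h5 hqm
    · exact h7 hqm

theorem reduceB_eq_one_iff (n : Nat) (hn : n ≠ 0) : reduceB n = 1 ↔ Smooth n := by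
  induction n using Nat.strong_induction_on with
  | _ n ih =>
    rw [reduceB]
    split
    · rename_i h
      have hg : gcdE n 210 = Nat.gcd 210 n := gcdE_eq n 210
      have hgd : gcdE n 210 ∣ n := hg ▸ Nat.gcd_dvd_right 210 n
      have hg210 : gcdE n 210 ∣ 210 := hg ▸ Nat.gcd_dvd_left 210 n
      have hpos : 0 < n / gcdE n 210 :=
        Nat.div_pos (Nat.le_of_dvd (Nat.pos_of_ne_zero hn) hgd) (by omega)
      rw [ih (n / gcdE n 210) (Nat.div_lt_self (Nat.pos_of_ne_zero hn) h.1)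
        (Nat.ne_of_gt hpos)]
      constructor
      · intro hs q hq hqn
        have : n = (n / gcdE n 210) * gcdE n 210 := (Nat.div_mul_cancel hgd).symm
        rcases (Nat.Prime.dvd_mul hq).mp (this ▸ hqn) with h' | h'
        · exact hs q hq h'
        · exact h'.trans hg210
      · intro hs q hq hqd
        exact hs q hq (hqd.trans (Nat.div_dvd_of_dvd hgd))
    · rename_i h
      have hg1 : gcdE n 210 = 1 := by
        have : gcdE n 210 ≠ 0 := by
          rw [gcdE_eq]
          simp [Nat.gcd_eq_zero_iff]
        omega
      constructor
      · intro h1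
        subst h1
        intro q hq hq1
        exact absurd (Nat.eq_one_of_dvd_one hq1) hq.one_lt.ne'
      · intro hs
        by_contra hne
        obtain ⟨q, hq, hqn⟩ := Nat.exists_prime_and_dvd hne
        have : q ∣ Nat.gcd 210 n := Nat.dvd_gcd (hs q hq hqn) hqn
        rw [← gcdE_eq, hg1] at this
        exact hq.one_lt.ne' (Nat.eq_one_of_dvd_one this)

theorem smooth_one : Smooth 1 := fun _ hq hq1 =>
  absurd (Nat.eq_one_of_dvd_one hq1) hq.one_lt.ne'

-- ===== VERDICT (by name: the statement is the Claim_ definition above) =====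
theorem is_7smooth_spec : Claim_equal_is_7smooth := by
  intro n _
  show is_7smooth n = is_7smooth_alt n
  unfold is_7smooth is_7smooth_alt
  by_cases h0 : n = 0
  · simp [h0]
  · have hm : n.natAbs ≠ 0 := fun h => h0 (Int.natAbs_eq_zero.mp h)
    rw [if_neg h0, if_neg hm]
    by_cases h1 : n.natAbs = 1
    · rw [if_pos h1, h1]
      exact (decide_eq_true ((reduceB_eq_one_iff 1 one_ne_zero).mpr smooth_one)).symm
    · rw [if_neg h1]
      exact decide_eq_decide.mpr
        ((chain_eq_one_iff n.natAbs hm).trans (reduceB_eq_one_iff n.natAbs hm).symm)
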